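-- pv_equiv track=rewrite | github.com/Chesedd/LightConductor | src/lightconductor/application/wire_assignment.py | validate_wire_assignment
-- ===== SOURCE A (Python) =====
-- from typing import List
--
-- def validate_wire_assignment(
--     cells: List[int],
--     canvas_size: int,
--     led_count: int,
-- ) -> List[str]:
--     """Return a list of validation errors (empty if valid).
--
--     Checks length matches led_count, all cells in [0, canvas_size),
--     no duplicates, and canvas_size >= 1.
--     """
--     errors: List[str] = []
--     if canvas_size < 1:
--         errors.append(f"canvas_size must be >= 1, got {canvas_size}")
--         return errors
--     if led_count < 0:
--         errors.append(f"led_count must be >= 0, got {led_count}")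
--     if len(cells) != led_count:
--         errors.append(f"wire length {len(cells)} does not match led_count {led_count}")
--     out_of_range = [c for c in cells if not (0 <= c < canvas_size)]
--     if out_of_range:
--         errors.append(f"cells out of canvas [0,{canvas_size}): {sorted(out_of_range)}")
--     if len(set(cells)) != len(cells):
--         dupes = [c for c in set(cells) if cells.count(c) > 1]
--         errors.append(f"duplicate cells: {sorted(dupes)}")
--     return errors
-- ===== SOURCE B (Python) =====
-- from typing import List
--
-- def validate_wire_assignment(
--     cells: List[int],
--     canvas_size: int,
--     led_count: int,
-- ) -> List[str]:
--     """Sort once, then derive both the out-of-range list and the duplicate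
--     values (via an adjacent scan) from the sorted list."""
--     if canvas_size < 1:
--         return [f"canvas_size must be >= 1, got {canvas_size}"]
--     errors: List[str] = []
--     if led_count < 0:
--         errors.append(f"led_count must be >= 0, got {led_count}")
--     if len(cells) != led_count:
--         errors.append(f"wire length {len(cells)} does not match led_count {led_count}")
--     ordered = sorted(cells)
--     out_of_range = [c for c in ordered if not (0 <= c < canvas_size)]
--     if out_of_range:
--         errors.append(f"cells out of canvas [0,{canvas_size}): {out_of_range}")
--     # first element of each run of length >= 2: a == next, and predecessor != a
--     dupes = [a for a, b, p in zip(ordered, ordered[1:], [None] + ordered) if a == b and p != a]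
--     if dupes:
--         errors.append(f"duplicate cells: {dupes}")
--     return errors
-- ===== Notes on version B (the rewrite author's own statement) =====
-- stated objective: faster
-- what changed: B sorts the cells once and derives everything from the sorted list: out-of-range offenders by filtering the sorted list (instead of filtering then re-sorting), and duplicate values by an adjacent-pair scan of the sorted list (instead of building a set and calling cells.count on each of its elements).
import Mathlib
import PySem

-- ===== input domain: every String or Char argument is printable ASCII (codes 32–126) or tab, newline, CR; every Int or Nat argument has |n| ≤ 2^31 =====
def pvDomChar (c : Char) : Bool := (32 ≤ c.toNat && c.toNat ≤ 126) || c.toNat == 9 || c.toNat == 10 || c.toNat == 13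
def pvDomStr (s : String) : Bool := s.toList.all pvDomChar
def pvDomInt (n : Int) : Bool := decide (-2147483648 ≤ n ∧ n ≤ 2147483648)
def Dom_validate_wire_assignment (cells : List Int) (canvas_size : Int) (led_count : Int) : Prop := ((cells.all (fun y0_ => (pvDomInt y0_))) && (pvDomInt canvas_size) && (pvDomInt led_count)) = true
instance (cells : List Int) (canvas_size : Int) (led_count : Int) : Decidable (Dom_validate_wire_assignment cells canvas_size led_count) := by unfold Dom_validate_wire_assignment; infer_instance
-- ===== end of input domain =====

-- B sorts the cells once and derives both the out-of-range list (filter of the sorted list)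
-- and the duplicate values (adjacent-pair scan of the sorted list) from it, replacing A's
-- filter-then-sort and set+count passes; alternative decomposition, same results.


-- shared formatting helper: Python's str() of a list of ints, e.g. "[1, 2, 3]"
def pvReprIntList (xs : List Int) : String :=
  "[" ++ PySem.Str.join ", " (xs.map PySem.Int.toStr) ++ "]"

-- ===== PORT A =====
def validate_wire_assignment (cells : List Int) (canvas_size : Int) (led_count : Int) : List String :=
  let errors : List String := []
  if canvas_size < 1 then
    errors ++ ["canvas_size must be >= 1, got " ++ PySem.Int.toStr canvas_size]
  else
    let errors := if led_count < 0 then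
        errors ++ ["led_count must be >= 0, got " ++ PySem.Int.toStr led_count] else errors
    let errors := if (cells.length : Int) ≠ led_count then
        errors ++ ["wire length " ++ PySem.Int.toStr cells.length ++ " does not match led_count "
                   ++ PySem.Int.toStr led_count] else errors
    let out_of_range := cells.filter (fun c => !(decide (0 ≤ c) && decide (c < canvas_size)))
    let errors := if out_of_range ≠ [] then
        errors ++ ["cells out of canvas [0," ++ PySem.Int.toStr canvas_size ++ "): "
                   ++ pvReprIntList (PySem.List.sorted out_of_range (fun x => x) false)] else errors
    let errors := if (PySem.Set.ofList cells).length ≠ cells.length then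
        let dupes := (PySem.Set.ofList cells).filter (fun c => decide (1 < PySem.List.count cells c))
        errors ++ ["duplicate cells: " ++ pvReprIntList (PySem.List.sorted dupes (fun x => x) false)]
      else errors
    errors

-- ===== PORT B =====
def validate_wire_assignment_alt (cells : List Int) (canvas_size : Int) (led_count : Int) : List String :=
  if canvas_size < 1 then
    ["canvas_size must be >= 1, got " ++ PySem.Int.toStr canvas_size]
  else
    let errors : List String := []
    let errors := if led_count < 0 then
        errors ++ ["led_count must be >= 0, got " ++ PySem.Int.toStr led_count] else errors
    let errors := if (cells.length : Int) ≠ led_count then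
        errors ++ ["wire length " ++ PySem.Int.toStr cells.length ++ " does not match led_count "
                   ++ PySem.Int.toStr led_count] else errors
    let ordered := PySem.List.sorted cells (fun x => x) false
    let out_of_range := ordered.filter (fun c => !(decide (0 ≤ c) && decide (c < canvas_size)))
    let errors := if out_of_range ≠ [] then
        errors ++ ["cells out of canvas [0," ++ PySem.Int.toStr canvas_size ++ "): "
                   ++ pvReprIntList out_of_range] else errors
    -- zip(ordered, ordered[1:], [None] + ordered): first element of each run of length >= 2
    let dupes := ((ordered.zip ordered.tail).zip ((none : Option Int) :: ordered.map some)).filterMap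
        (fun t => if t.1.1 = t.1.2 ∧ t.2 ≠ some t.1.1 then some t.1.1 else none)
    let errors := if dupes ≠ [] then
        errors ++ ["duplicate cells: " ++ pvReprIntList dupes] else errors
    errors

-- ===== PRECONDITION & SPEC =====
def Spec_validate_wire_assignment (cells : List Int) (canvas_size : Int) (led_count : Int) (out : List String) : Prop := out = validate_wire_assignment_alt cells canvas_size led_count
instance (cells : List Int) (canvas_size : Int) (led_count : Int) (out : List String) : Decidable (Spec_validate_wire_assignment cells canvas_size led_count out) := by unfold Spec_validate_wire_assignment; infer_instance

-- ===== CLAIM (what is proved, stated in full; the proofs are below) =====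
def Claim_equal_validate_wire_assignment : Prop := ∀ (cells : List Int) (canvas_size : Int) (led_count : Int), Dom_validate_wire_assignment cells canvas_size led_count → Spec_validate_wire_assignment cells canvas_size led_count (validate_wire_assignment cells canvas_size led_count)

-- ===== LEMMAS AND PROOFS =====

-- recursive form of B's adjacent-pair scan, for reasoning
def pvDrAux : Option Int → List Int → List Int
  | p, a :: b :: t => (if a = b ∧ p ≠ some a then [a] else []) ++ pvDrAux (some a) (b :: t)
  | _, _ => []

theorem pvDrAux_nil (p : Option Int) : pvDrAux p [] = [] := by simp [pvDrAux]

theorem pvDrAux_single (p : Option Int) (a : Int) : pvDrAux p [a] = [] := by simp [pvDrAux]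

theorem pvDrAux_cons2 (p : Option Int) (a b : Int) (u : List Int) :
    pvDrAux p (a :: b :: u) = (if a = b ∧ p ≠ some a then [a] else []) ++ pvDrAux (some a) (b :: u) := by
  simp [pvDrAux]

theorem pvZip_eq_drAux (s : List Int) (p : Option Int) :
    ((s.zip s.tail).zip (p :: s.map some)).filterMap
      (fun t => if t.1.1 = t.1.2 ∧ t.2 ≠ some t.1.1 then some t.1.1 else none)
    = pvDrAux p s := by
  induction s generalizing p with
  | nil => simp [pvDrAux_nil]
  | cons a t ih =>
    cases t with
    | nil => simp [pvDrAux_single]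
    | cons b u =>
      have h2 := ih (some a)
      simp only [List.tail_cons, List.map_cons] at h2
      rw [pvDrAux_cons2]
      simp only [List.tail_cons, List.map_cons, List.zip_cons_cons, List.filterMap_cons]
      by_cases h : a = b ∧ p ≠ some a
      · simp only [if_pos h, h2, List.singleton_append]
      · simp only [if_neg h, h2, List.nil_append]

theorem pvDrAux_mem (x : Int) (s : List Int) : ∀ (p : Option Int),
    s.Pairwise (· ≤ ·) → (∀ l, p = some l → ∀ y ∈ s, l ≤ y) →
    (x ∈ pvDrAux p s ↔ 1 < s.count x ∧ p ≠ some x) := by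
  induction s with
  | nil => intro p _ _; simp [pvDrAux_nil]
  | cons a t ih =>
    intro p hs hp
    cases t with
    | nil =>
      simp only [pvDrAux_single, List.not_mem_nil, false_iff, not_and]
      intro hc
      simp only [List.count_singleton] at hc
      split at hc <;> omega
    | cons b u =>
      rw [pvDrAux_cons2]
      have ha : ∀ y ∈ b :: u, a ≤ y := fun y hy => (List.pairwise_cons.mp hs).1 y hy
      have hs' : (b :: u).Pairwise (· ≤ ·) := (List.pairwise_cons.mp hs).2
      have hpa : ∀ l, (some a : Option Int) = some l → ∀ y ∈ b :: u, l ≤ y := by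
        intro l hl y hy
        injection hl with h; subst h; exact ha y hy
      have ih' := ih (some a) hs' hpa
      by_cases hxa : x = a
      · subst hxa
        have hmem : x ∈ b :: u ↔ x = b := by
          constructor
          · intro hm
            rcases List.mem_cons.mp hm with h | h
            · exact h
            · have h1 : x ≤ b := ha b (by simp)
              have h2 : b ≤ x := (List.pairwise_cons.mp hs').1 x h
              omega
          · intro h; simp [h]
        constructor
        · intro hin
          rcases List.mem_append.mp hin with h | h
          · by_cases hc : x = b ∧ p ≠ some x
            · refine ⟨?_, hc.2⟩
              have hxm : x ∈ b :: u := hmem.mpr hc.1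
              have hpos : 0 < (b :: u).count x := List.count_pos_iff.mpr hxm
              rw [List.count_cons_self]; omega
            · rw [if_neg hc] at h; simp at h
          · have h2 := (ih'.mp h).2
            simp at h2
        · rintro ⟨hcnt, hpx⟩
          rw [List.count_cons_self] at hcnt
          have hxm : x ∈ b :: u := List.count_pos_iff.mp (by omega)
          have hb : x = b := hmem.mp hxm
          exact List.mem_append.mpr (Or.inl (by rw [if_pos ⟨hb, hpx⟩]; simp))
      · constructor
        · intro hin
          rcases List.mem_append.mp hin with h | h
          · split at h
            · simp at h; exact absurd h hxa
            · simp at h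
          · have h1 := (ih'.mp h).1
            have hxm : x ∈ b :: u := List.count_pos_iff.mp (by omega)
            refine ⟨by rw [List.count_cons_of_ne (Ne.symm hxa)]; exact h1, ?_⟩
            intro hpx
            have h2 : a ≤ x := ha x hxm
            have h3 : x ≤ a := hp x hpx a (by simp)
            exact hxa (by omega)
        · rintro ⟨hcnt, _⟩
          rw [List.count_cons_of_ne (Ne.symm hxa)] at hcnt
          refine List.mem_append.mpr (Or.inr (ih'.mpr ⟨hcnt, ?_⟩))
          intro h; injection h with h; exact hxa h.symm

theorem pvDrAux_pairwise (s : List Int) : ∀ (p : Option Int),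
    s.Pairwise (· ≤ ·) → (∀ l, p = some l → ∀ y ∈ s, l ≤ y) →
    (pvDrAux p s).Pairwise (· < ·) := by
  induction s with
  | nil => intro p _ _; simp [pvDrAux_nil]
  | cons a t ih =>
    intro p hs hp
    cases t with
    | nil => simp [pvDrAux_single]
    | cons b u =>
      rw [pvDrAux_cons2]
      have ha : ∀ y ∈ b :: u, a ≤ y := fun y hy => (List.pairwise_cons.mp hs).1 y hy
      have hs' : (b :: u).Pairwise (· ≤ ·) := (List.pairwise_cons.mp hs).2
      have hpa : ∀ l, (some a : Option Int) = some l → ∀ y ∈ b :: u, l ≤ y := by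
        intro l hl y hy
        injection hl with h; subst h; exact ha y hy
      have hrest := ih (some a) hs' hpa
      split_ifs with hc
      · rw [List.singleton_append, List.pairwise_cons]
        refine ⟨?_, hrest⟩
        intro y hy
        have hm := (pvDrAux_mem y (b :: u) (some a) hs' hpa).mp hy
        have hy2 : y ∈ b :: u := List.count_pos_iff.mp (by omega)
        have h1 : a ≤ y := ha y hy2
        have h2 : y ≠ a := by intro h; exact hm.2 (by rw [h])
        omega
      · simpa using hrest

-- sorting commutes with filtering
theorem pvSortedFilter (cells : List Int) (q : Int → Bool) :
    PySem.List.sorted (cells.filter q) (fun x => x) false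
      = (PySem.List.sorted cells (fun x => x) false).filter q := by
  apply PySem.List.sorted_id_eq_of_perm_of_pairwise
  · exact (PySem.List.sorted_perm cells (fun x => x) false).filter q
  · exact (PySem.List.sorted_pairwise cells (fun x => x)).filter q

theorem pvSorted_hp (cells : List Int) :
    ∀ l, (none : Option Int) = some l → ∀ y ∈ PySem.List.sorted cells (fun x => x) false, l ≤ y := by
  intro l hl; exact absurd hl (by simp)

-- B's adjacent scan of the sorted list IS A's sorted duplicate-value list
theorem pvDup_eq (cells : List Int) :
    PySem.List.sorted
        ((PySem.Set.ofList cells).filter (fun c => decide (1 < PySem.List.count cells c)))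
        (fun x => x) false
      = pvDrAux none (PySem.List.sorted cells (fun x => x) false) := by
  have hs : (PySem.List.sorted cells (fun x => x) false).Pairwise (· ≤ ·) :=
    PySem.List.sorted_pairwise cells (fun x => x)
  have hp := pvSorted_hp cells
  have hpw := pvDrAux_pairwise (PySem.List.sorted cells (fun x => x) false) none hs hp
  apply PySem.List.sorted_id_eq_of_perm_of_pairwise
  · rw [List.perm_ext_iff_of_nodup (hpw.imp (fun h => ne_of_lt h))
        ((PySem.Set.nodup_ofList cells).filter _)]
    intro x
    rw [pvDrAux_mem x _ none hs hp, List.mem_filter]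
    have hc : (PySem.List.sorted cells (fun x => x) false).count x = cells.count x :=
      (PySem.List.sorted_perm cells (fun x => x) false).count_eq x
    simp only [hc, PySem.Set.mem_ofList, PySem.List.count_eq, decide_eq_true_eq]
    constructor
    · rintro ⟨h1, _⟩
      exact ⟨List.count_pos_iff.mp (by omega), h1⟩
    · rintro ⟨_, h1⟩
      exact ⟨h1, by simp⟩
  · exact hpw.imp (fun h => le_of_lt h)

-- set(cells) has full length exactly when cells has no duplicates
theorem pvLenOfList (cells : List Int) :
    (PySem.Set.ofList cells).length = cells.length ↔ cells.Nodup := by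
  constructor
  · intro h
    have hsub : (PySem.Set.ofList cells) ⊆ cells := fun x hx => (PySem.Set.mem_ofList _ _).mp hx
    have hsp := (PySem.Set.nodup_ofList cells).subperm hsub
    have hperm := hsp.perm_of_length_le (by omega)
    exact hperm.nodup_iff.mp (PySem.Set.nodup_ofList cells)
  · intro h; exact congrArg List.length (PySem.Set.ofList_eq_self_of_nodup cells h)

-- A's duplicate guard coincides with B's (the scan is non-empty)
theorem pvDupGuard (cells : List Int) :
    ((PySem.Set.ofList cells).length ≠ cells.length)
      = (pvDrAux none (PySem.List.sorted cells (fun x => x) false) ≠ []) := by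
  have hs : (PySem.List.sorted cells (fun x => x) false).Pairwise (· ≤ ·) :=
    PySem.List.sorted_pairwise cells (fun x => x)
  have hp := pvSorted_hp cells
  apply propext
  rw [Ne, pvLenOfList, List.nodup_iff_count_le_one]
  constructor
  · intro h
    push Not at h
    obtain ⟨x, hx⟩ := h
    intro hnil
    have hm := (pvDrAux_mem x _ none hs hp).mpr
      ⟨by rw [(PySem.List.sorted_perm cells (fun x => x) false).count_eq x]; omega, by simp⟩
    rw [hnil] at hm
    simp at hm
  · intro h hall
    apply h
    rw [List.eq_nil_iff_forall_not_mem]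
    intro x hx
    have hm := (pvDrAux_mem x _ none hs hp).mp hx
    rw [(PySem.List.sorted_perm cells (fun x => x) false).count_eq x] at hm
    have := hall x
    omega

-- the out-of-range guard coincides (filtering a permutation)
theorem pvOorGuard (cells : List Int) (q : Int → Bool) :
    (cells.filter q ≠ []) = ((PySem.List.sorted cells (fun x => x) false).filter q ≠ []) := by
  apply propext
  have hp : ((PySem.List.sorted cells (fun x => x) false).filter q).Perm (cells.filter q) :=
    (PySem.List.sorted_perm cells (fun x => x) false).filter q
  have hl := hp.length_eq
  constructor <;> intro h <;> intro hnil <;> apply h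
  · rw [← List.length_eq_zero_iff] at hnil ⊢; omega
  · rw [← List.length_eq_zero_iff] at hnil ⊢; omega

-- ===== VERDICT (by name: the statement is the Claim_ definition above) =====
theorem validate_wire_assignment_spec : Claim_equal_validate_wire_assignment := by
  intro cells canvas_size led_count _
  unfold Spec_validate_wire_assignment
  by_cases h1 : canvas_size < 1
  · simp [validate_wire_assignment, validate_wire_assignment_alt, h1]
  · simp only [validate_wire_assignment, validate_wire_assignment_alt, if_neg h1,
      List.nil_append]
    rw [pvSortedFilter cells (fun c => !(decide (0 ≤ c) && decide (c < canvas_size)))]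
    rw [pvZip_eq_drAux (PySem.List.sorted cells (fun x => x) false) none]
    rw [pvDup_eq cells]
    simp only [pvOorGuard cells (fun c => !(decide (0 ≤ c) && decide (c < canvas_size))),
      pvDupGuard cells]
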